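-- pv_equiv track=rewrite | github.com/BlueBrain/region-grower | region_grower/placement_algorithm_utils.py | _calc_dir_depth
-- ===== SOURCE A (Python) =====
-- def _calc_dir_depth(num_files, max_files_per_dir=None):
--     """ Directory depth required to have no more than given number of files per folder. """
--     if (max_files_per_dir is None) or (num_files < max_files_per_dir):
--         return None
--     if max_files_per_dir < 256:
--         raise RuntimeError(
--             """
--             Less than 256 files per folder is too restrictive.
--         """
--         )
--     result, capacity = 0, max_files_per_dir
--     while capacity < num_files:
--         result += 1
--         capacity *= 256
--     if result > 3:
--         raise RuntimeError(
--             """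
--             More than three intermediate folders is a bit too much.
--         """
--         )
--     return result
-- ===== SOURCE B (Python) =====
-- def _calc_dir_depth(num_files, max_files_per_dir=None):
--     """ Directory depth required to have no more than given number of files per folder. """
--     if (max_files_per_dir is None) or (num_files < max_files_per_dir):
--         return None
--     if max_files_per_dir < 256:
--         raise RuntimeError(
--             """
--             Less than 256 files per folder is too restrictive.
--         """
--         )
--     q = (num_files + max_files_per_dir - 1) // max_files_per_dir  # ceil(num_files / cap)
--     result = ((q - 1).bit_length() + 7) // 8
--     if result > 3:
--         raise RuntimeError(
--             """
--             More than three intermediate folders is a bit too much.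
--         """
--         )
--     return result
-- ===== Notes on version B (the rewrite author's own statement) =====
-- stated objective: simpler
-- what changed: Replaces the multiply-by-256 while loop with a closed form: depth = ceil-div then (bit_length(q-1)+7)//8, keeping all three guards.
import Mathlib
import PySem

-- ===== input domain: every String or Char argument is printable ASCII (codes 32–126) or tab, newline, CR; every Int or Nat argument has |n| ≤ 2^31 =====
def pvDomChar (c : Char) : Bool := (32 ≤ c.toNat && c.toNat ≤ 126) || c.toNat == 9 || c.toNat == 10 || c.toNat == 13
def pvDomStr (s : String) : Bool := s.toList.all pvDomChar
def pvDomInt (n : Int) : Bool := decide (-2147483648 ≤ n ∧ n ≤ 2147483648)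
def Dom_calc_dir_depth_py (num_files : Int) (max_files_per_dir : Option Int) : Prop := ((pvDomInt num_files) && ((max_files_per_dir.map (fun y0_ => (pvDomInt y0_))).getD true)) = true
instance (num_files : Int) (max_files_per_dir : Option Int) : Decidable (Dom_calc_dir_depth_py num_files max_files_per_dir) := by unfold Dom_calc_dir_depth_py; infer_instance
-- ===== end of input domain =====

-- B replaces A's multiply-by-256 while loop with a closed form (ceiling division + bit_length);
-- objective: simpler. Both raise branches of A are modelled as `none` and excluded by Pre_ where reachable.

-- ===== PORT A =====
-- `while capacity < num_files: result += 1; capacity *= 256`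
-- (the extra `1 ≤ capacity` guard only makes the recursion total: Python diverges there,
--  and A never reaches the loop with capacity < 256)
def calcDirDepthLoop (num_files result capacity : Int) : Int :=
  if capacity < num_files ∧ 1 ≤ capacity then
    calcDirDepthLoop num_files (result + 1) (capacity * 256)
  else result
termination_by (num_files - capacity).toNat
decreasing_by omega

def calc_dir_depth_py (num_files : Int) (max_files_per_dir : Option Int) : Option Int :=
  match max_files_per_dir with
  | none => none
  | some m =>
    if num_files < m then none
    else if m < 256 then none          -- RuntimeError (excluded by Pre_)
    else
      let result := calcDirDepthLoop num_files 0 m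
      if result > 3 then none          -- RuntimeError (unreachable inside Dom)
      else some result

-- ===== PORT B =====
def calc_dir_depth_py_alt (num_files : Int) (max_files_per_dir : Option Int) : Option Int :=
  match max_files_per_dir with
  | none => none
  | some m =>
    if num_files < m then none
    else if m < 256 then none          -- RuntimeError (excluded by Pre_)
    else
      let q := PySem.Int.floordiv (num_files + m - 1) m
      let result := PySem.Int.floordiv ((PySem.Int.bitLength (q - 1) : Int) + 7) 8
      if result > 3 then none          -- RuntimeError (unreachable inside Dom)
      else some result

-- ===== PRECONDITION & SPEC =====
-- Pre_ excludes exactly the inputs where A raises RuntimeError inside Dom: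
-- max_files_per_dir = some m with m < 256 and num_files ≥ m.
def Pre_calc_dir_depth_py (num_files : Int) (max_files_per_dir : Option Int) : Prop :=
  (max_files_per_dir.all fun m => decide (num_files < m ∨ 256 ≤ m)) = true
instance (num_files : Int) (max_files_per_dir : Option Int) : Decidable (Pre_calc_dir_depth_py num_files max_files_per_dir) := by unfold Pre_calc_dir_depth_py; infer_instance

def pvWitness_calc_dir_depth_py : Int × Option Int := (70000, some 300)

def Spec_calc_dir_depth_py (num_files : Int) (max_files_per_dir : Option Int) (out : Option Int) : Prop := out = calc_dir_depth_py_alt num_files max_files_per_dir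
instance (num_files : Int) (max_files_per_dir : Option Int) (out : Option Int) : Decidable (Spec_calc_dir_depth_py num_files max_files_per_dir out) := by unfold Spec_calc_dir_depth_py; infer_instance

-- ===== CLAIM (what is proved, stated in full; the proofs are below) =====
def Claim_equal_calc_dir_depth_py : Prop := ∀ (num_files : Int) (max_files_per_dir : Option Int), Dom_calc_dir_depth_py num_files max_files_per_dir → Pre_calc_dir_depth_py num_files max_files_per_dir → Spec_calc_dir_depth_py num_files max_files_per_dir (calc_dir_depth_py num_files max_files_per_dir)

-- ===== LEMMAS AND PROOFS =====

lemma calcDirDepthLoop_eq (nf r c : Int) :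
    calcDirDepthLoop nf r c =
      if c < nf ∧ 1 ≤ c then calcDirDepthLoop nf (r + 1) (c * 256) else r := by
  rw [calcDirDepthLoop]

-- bitLength bracketed by powers of two
lemma bitLength_bounds (x : Int) (lo k : Nat)
    (h1 : 2 ^ lo ≤ x.natAbs) (h2 : x.natAbs < 2 ^ k) :
    lo < PySem.Int.bitLength x ∧ PySem.Int.bitLength x ≤ k := by
  constructor
  · by_contra h
    push Not at h
    have := Nat.pow_le_pow_right (by norm_num : 1 ≤ 2) h
    have := PySem.Int.lt_two_pow_bitLength x
    omega
  · have hx : x ≠ 0 := by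
      intro h; subst h; simp at h1
    have hlow := PySem.Int.two_pow_bitLength_le x hx
    by_contra h
    push Not at h
    have : k ≤ PySem.Int.bitLength x - 1 := by omega
    have := Nat.pow_le_pow_right (by norm_num : 1 ≤ 2) this
    omega

-- the closed form (bitLength (q-1) + 7) // 8, for q in a power-of-256 bracket
lemma closed_form_val (q : Int) (j : Nat)
    (hlo : (256 : Int) ^ j < q) (hhi : q ≤ 256 ^ (j + 1)) :
    PySem.Int.floordiv ((PySem.Int.bitLength (q - 1) : Int) + 7) 8 = (j : Int) + 1 := by
  have hq1 : (1 : Int) ≤ q - 1 := by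
    have : (1 : Int) ≤ 256 ^ j := one_le_pow₀ (by norm_num)
    omega
  have hna_lo : 2 ^ (8 * j) ≤ (q - 1).natAbs := by
    have h256 : ((256 : Int) ^ j) = ((2 ^ (8 * j) : Nat) : Int) := by
      push_cast [pow_mul]; norm_num
    rw [h256] at hlo
    omega
  have hna_hi : (q - 1).natAbs < 2 ^ (8 * j + 8) := by
    have h256 : ((256 : Int) ^ (j + 1)) = ((2 ^ (8 * j + 8) : Nat) : Int) := by
      push_cast [pow_mul, pow_add]; norm_num
    rw [h256] at hhi
    omega
  obtain ⟨hb1, hb2⟩ := bitLength_bounds (q - 1) (8 * j) (8 * j + 8) hna_lo hna_hi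
  rw [PySem.Int.floordiv_eq_ediv_of_pos (by norm_num : (0:Int) < 8)]
  omega

lemma div_q_bounds (nf m : Int) (hm : 0 < m) :
    nf ≤ m * PySem.Int.floordiv (nf + m - 1) m ∧
    m * (PySem.Int.floordiv (nf + m - 1) m - 1) < nf := by
  set q := PySem.Int.floordiv (nf + m - 1) m with hq
  have h1 : q * m ≤ nf + m - 1 := (PySem.Int.le_floordiv_iff_mul_le hm).mp le_rfl
  have h2 : nf + m - 1 < (q + 1) * m := (PySem.Int.floordiv_lt_iff_lt_mul hm).mp (lt_add_one q)
  constructor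
  · nlinarith
  · nlinarith

lemma portA_val (nf m d : Int) (h1 : ¬ nf < m) (h2 : ¬ m < 256)
    (h3 : calcDirDepthLoop nf 0 m = d) (h4 : d ≤ 3) :
    calc_dir_depth_py nf (some m) = some d := by
  simp only [calc_dir_depth_py]
  rw [if_neg h1, if_neg h2]
  simp only [h3]
  rw [if_neg (by omega)]

lemma portB_val (nf m d : Int) (h1 : ¬ nf < m) (h2 : ¬ m < 256)
    (h3 : PySem.Int.floordiv ((PySem.Int.bitLength (PySem.Int.floordiv (nf + m - 1) m - 1) : Int) + 7) 8 = d)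
    (h4 : d ≤ 3) :
    calc_dir_depth_py_alt nf (some m) = some d := by
  simp only [calc_dir_depth_py_alt]
  rw [if_neg h1, if_neg h2]
  simp only [h3]
  rw [if_neg (by omega)]

lemma main_eq (nf m : Int) (hm : 256 ≤ m) (hnf : m ≤ nf) (hb : nf ≤ 2147483648) :
    calc_dir_depth_py nf (some m) = calc_dir_depth_py_alt nf (some m) := by
  have hm0 : (0 : Int) < m := by omega
  obtain ⟨hq1, hq2⟩ := div_q_bounds nf m hm0
  set q := PySem.Int.floordiv (nf + m - 1) m with hqdef
  have h4 : ¬ (m * 256 * 256 * 256 < nf) := by nlinarith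
  by_cases c1 : m < nf
  · by_cases c2 : m * 256 < nf
    · by_cases c3 : m * 256 * 256 < nf
      · -- depth 3 : 65536*m < nf ≤ 2^31; q ∈ (2^16, 2^24]
        have hA : calcDirDepthLoop nf 0 m = 3 := by
          rw [calcDirDepthLoop_eq, if_pos ⟨c1, by omega⟩,
              calcDirDepthLoop_eq, if_pos ⟨c2, by nlinarith⟩,
              calcDirDepthLoop_eq, if_pos ⟨c3, by nlinarith⟩,
              calcDirDepthLoop_eq, if_neg (by omega)]
          norm_num
        have hqlo : (65536 : Int) < q := by nlinarith
        have hqhi : q ≤ 16777216 := by nlinarith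
        have hB := closed_form_val q 2 (by norm_num; omega) (by norm_num; omega)
        rw [portA_val nf m 3 (by omega) (by omega) hA (by norm_num),
            portB_val nf m 3 (by omega) (by omega) (by rw [← hqdef, hB]; norm_num) (by norm_num)]
      · -- depth 2 : 256*m < nf ≤ 65536*m; q ∈ (2^8, 2^16]
        have hA : calcDirDepthLoop nf 0 m = 2 := by
          rw [calcDirDepthLoop_eq, if_pos ⟨c1, by omega⟩,
              calcDirDepthLoop_eq, if_pos ⟨c2, by nlinarith⟩,
              calcDirDepthLoop_eq, if_neg (by omega)]
          norm_num
        have hqlo : (256 : Int) < q := by nlinarith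
        have hqhi : q ≤ 65536 := by nlinarith
        have hB := closed_form_val q 1 (by norm_num; omega) (by norm_num; omega)
        rw [portA_val nf m 2 (by omega) (by omega) hA (by norm_num),
            portB_val nf m 2 (by omega) (by omega) (by rw [← hqdef, hB]; norm_num) (by norm_num)]
    · -- depth 1 : m < nf ≤ 256*m; q ∈ (1, 256]
      have hA : calcDirDepthLoop nf 0 m = 1 := by
        rw [calcDirDepthLoop_eq, if_pos ⟨c1, by omega⟩,
            calcDirDepthLoop_eq, if_neg (by omega)]
        norm_num
      have hqlo : (1 : Int) < q := by nlinarith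
      have hqhi : q ≤ 256 := by nlinarith
      have hB := closed_form_val q 0 (by norm_num; omega) (by norm_num; omega)
      rw [portA_val nf m 1 (by omega) (by omega) hA (by norm_num),
          portB_val nf m 1 (by omega) (by omega) (by rw [← hqdef, hB]; norm_num) (by norm_num)]
  · -- depth 0 : nf = m; q = 1
    have hA : calcDirDepthLoop nf 0 m = 0 := by
      rw [calcDirDepthLoop_eq, if_neg (by omega)]
    have hq : q = 1 := by nlinarith
    rw [portA_val nf m 0 (by omega) (by omega) hA (by norm_num),
        portB_val nf m 0 (by omega) (by omega) (by rw [← hqdef, hq]; decide) (by norm_num)]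

-- ===== VERDICT (by name: the statement is the Claim_ definition above) =====
theorem calc_dir_depth_py_spec : Claim_equal_calc_dir_depth_py := by
  intro nf mx hdom hpre
  unfold Spec_calc_dir_depth_py
  match mx with
  | none => rfl
  | some m =>
    unfold Dom_calc_dir_depth_py pvDomInt at hdom
    unfold Pre_calc_dir_depth_py at hpre
    simp [Option.all_some] at hpre
    simp at hdom
    by_cases h0 : nf < m
    · simp only [calc_dir_depth_py, calc_dir_depth_py_alt]
      rw [if_pos h0, if_pos h0]
    · have hm : 256 ≤ m := by omega
      exact main_eq nf m hm (by omega) (by omega)
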